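-- pv_equiv track=rewrite | github.com/Jeremiah-Roise/Jeremiah-cs50-solutions | sentimental-readability/readability.py | getWord
-- ===== SOURCE A (Python) =====
-- def getWord(startIndex, text):
--     word = ""
--     recording = False
--     for i in range(startIndex, len(text)):
--         char = text[i]
--
--         # first activation starts recording, second activation stops recording and exits.
--         if char == ' ':
--             if recording == True:
--                 return (word, i)
--             recording = False
--         else:
--             if recording == False:
--                 recording = True
--             if recording == True:
--                 word += char
--
--     return (word, 0)
-- ===== SOURCE B (Python) =====
-- def getWord(startIndex, text):
--     # Two-phase index scan: skip spaces, then find the end of the word; no per-char state machine.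
--     n = len(text)
--     i = startIndex
--     while i < n and text[i] == ' ':
--         i += 1
--     j = i
--     while j < n and text[j] != ' ':
--         j += 1
--     word = ''.join(text[k] for k in range(i, j))
--     return (word, j if j < n else 0)
-- ===== Notes on version B (the rewrite author's own statement) =====
-- stated objective: simpler
-- what changed: Replaced the char-appending state machine with (word, recording) flag and early return by a two-phase index scan: skip spaces, advance to the word's end, then build the word from the index range in one go.
import Mathlib
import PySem

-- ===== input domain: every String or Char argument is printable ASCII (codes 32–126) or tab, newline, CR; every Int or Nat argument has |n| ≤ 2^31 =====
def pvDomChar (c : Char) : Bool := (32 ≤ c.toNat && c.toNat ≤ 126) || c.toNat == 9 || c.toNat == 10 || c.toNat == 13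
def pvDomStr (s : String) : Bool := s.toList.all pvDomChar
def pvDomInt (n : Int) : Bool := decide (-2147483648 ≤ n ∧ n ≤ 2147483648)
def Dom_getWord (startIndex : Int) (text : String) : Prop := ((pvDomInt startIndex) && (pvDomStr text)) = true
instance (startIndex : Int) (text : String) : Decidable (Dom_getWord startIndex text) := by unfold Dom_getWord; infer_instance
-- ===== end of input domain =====

-- B replaces A's char-appending state machine by a two-phase index scan (simpler decomposition, same cost).

-- ===== PORT A =====
-- loop over range(startIndex, len(text)) with state (word, recording); the 'none' branch
-- of pyGet? is Python's IndexError, unreachable under Pre_getWord.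
def getWordGoA (text : List Char) : List Int → List Char → Bool → String × Int
  | [], word, _ => (String.ofList word, 0)
  | i :: rest, word, recording =>
    match PySem.List.pyGet? text i with
    | none => (String.ofList word, 0)
    | some c =>
      if c = ' ' then
        if recording then (String.ofList word, i) else getWordGoA text rest word false
      else getWordGoA text rest (word ++ [c]) true

def getWord (startIndex : Int) (text : String) : String × Int :=
  getWordGoA text.toList (PySem.List.pyRange startIndex (text.toList.length : Int) 1) [] false

-- ===== PORT B =====
-- while i < n and text[i] == ' ': i += 1   (pyGet? = none is Python's IndexError, outside Pre_)
def getWordSkip (text : List Char) (i : Int) : Int :=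
  if h : i < (text.length : Int) then
    if PySem.List.pyGet? text i = some ' ' then getWordSkip text (i + 1) else i
  else i
termination_by ((text.length : Int) - i).toNat
decreasing_by omega

-- while j < n and text[j] != ' ': j += 1
def getWordScan (text : List Char) (j : Int) : Int :=
  if h : j < (text.length : Int) then
    match PySem.List.pyGet? text j with
    | none => j
    | some c => if c = ' ' then j else getWordScan text (j + 1)
  else j
termination_by ((text.length : Int) - j).toNat
decreasing_by omega

def getWord_alt (startIndex : Int) (text : String) : String × Int :=
  let t := text.toList
  let n : Int := t.length
  let i := getWordSkip t startIndex
  let j := getWordScan t i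
  -- ''.join(text[k] for k in range(i, j)); each read is in range here, getD is a dummy
  let word := (PySem.List.pyRange i j 1).map (fun k => (PySem.List.pyGet? t k).getD ' ')
  (String.ofList word, if j < n then j else 0)

-- ===== PRECONDITION & SPEC =====
-- Pre_ excludes exactly the inputs where A raises IndexError: startIndex < -len(text)
-- (there the first read text[startIndex] is out of range).
def Pre_getWord (startIndex : Int) (text : String) : Prop :=
  -(text.toList.length : Int) ≤ startIndex
instance (startIndex : Int) (text : String) : Decidable (Pre_getWord startIndex text) := by
  unfold Pre_getWord; infer_instance

def pvWitness_getWord : Int × String := (0, "hi there")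

def Spec_getWord (startIndex : Int) (text : String) (out : String × Int) : Prop := out = getWord_alt startIndex text
instance (startIndex : Int) (text : String) (out : String × Int) : Decidable (Spec_getWord startIndex text out) := by unfold Spec_getWord; infer_instance

-- ===== CLAIM (what is proved, stated in full; the proofs are below) =====
def Claim_equal_getWord : Prop := ∀ (startIndex : Int) (text : String), Dom_getWord startIndex text → Pre_getWord startIndex text → Spec_getWord startIndex text (getWord startIndex text)

-- ===== LEMMAS AND PROOFS =====

theorem getWordSkip_ge (t : List Char) (i : Int) : i ≤ getWordSkip t i := by
  unfold getWordSkip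
  split_ifs with h1 h2
  · have := getWordSkip_ge t (i + 1); omega
  · exact le_refl i
  · exact le_refl i
termination_by ((t.length : Int) - i).toNat
decreasing_by omega

theorem getWordScan_ge (t : List Char) (j : Int) : j ≤ getWordScan t j := by
  unfold getWordScan
  split_ifs with h1
  · cases hg : PySem.List.pyGet? t j with
    | none => simp
    | some c =>
      simp only
      split_ifs with hc
      · exact le_refl j
      · have := getWordScan_ge t (j + 1); omega
  · exact le_refl j
termination_by ((t.length : Int) - j).toNat
decreasing_by omega

-- the skip loop stops at the end of the text or at a non-space character
theorem getWordSkip_stop (t : List Char) (i : Int) :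
    (t.length : Int) ≤ getWordSkip t i ∨ ¬ PySem.List.pyGet? t (getWordSkip t i) = some ' ' := by
  unfold getWordSkip
  split_ifs with h1 h2
  · exact getWordSkip_stop t (i + 1)
  · exact Or.inr h2
  · exact Or.inl (by omega)
termination_by ((t.length : Int) - i).toNat
decreasing_by omega

theorem pyGet?_isSome_of_inrange (t : List Char) (i : Int)
    (h1 : -(t.length : Int) ≤ i) (h2 : i < (t.length : Int)) :
    ∃ c, PySem.List.pyGet? t i = some c := by
  cases hg : PySem.List.pyGet? t i with
  | some c => exact ⟨c, rfl⟩
  | none =>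
    rw [PySem.List.pyGet?_eq_none_iff] at hg
    exact absurd ⟨h1, h2⟩ hg

-- collect phase: A's loop with recording = True computes B's word slice and end index
theorem goA_true_eq (t : List Char) (i : Int) (w : List Char) (hlo : -(t.length : Int) ≤ i) :
    getWordGoA t (PySem.List.pyRange i (t.length : Int) 1) w true =
      (String.ofList (w ++ (PySem.List.pyRange i (getWordScan t i) 1).map
          (fun k => (PySem.List.pyGet? t k).getD ' ')),
       if getWordScan t i < (t.length : Int) then getWordScan t i else 0) := by
  by_cases h1 : i < (t.length : Int)
  · obtain ⟨c, hg⟩ := pyGet?_isSome_of_inrange t i hlo h1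
    by_cases hc : c = ' '
    · have hscan : getWordScan t i = i := by
        unfold getWordScan; rw [dif_pos h1, hg]; simp [hc]
      rw [hscan, PySem.List.pyRange_one_cons h1, PySem.List.pyRange_one_eq_nil (le_refl i)]
      simp [getWordGoA, hg, hc, h1]
    · have hscan : getWordScan t i = getWordScan t (i + 1) := by
        rw [getWordScan.eq_def, dif_pos h1, hg]; simp [hc]
      have hij : i < getWordScan t (i + 1) := by
        have := getWordScan_ge t (i + 1); omega
      rw [hscan, PySem.List.pyRange_one_cons h1, PySem.List.pyRange_one_cons hij]
      simp only [getWordGoA, hg, if_neg hc]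
      rw [goA_true_eq t (i + 1) (w ++ [c]) (by omega)]
      simp [hg]
  · have hscan : getWordScan t i = i := by
      unfold getWordScan; rw [dif_neg h1]
    rw [hscan, PySem.List.pyRange_one_eq_nil (by omega),
        PySem.List.pyRange_one_eq_nil (le_refl i)]
    simp [getWordGoA, h1]
termination_by ((t.length : Int) - i).toNat
decreasing_by omega

-- skip phase: A's loop with recording = False jumps to the first non-space index
theorem goA_false_skip (t : List Char) (i : Int) (hlo : -(t.length : Int) ≤ i) :
    getWordGoA t (PySem.List.pyRange i (t.length : Int) 1) [] false =
      getWordGoA t (PySem.List.pyRange (getWordSkip t i) (t.length : Int) 1) [] false := by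
  unfold getWordSkip
  split_ifs with h1 h2
  · rw [PySem.List.pyRange_one_cons h1]
    simp only [getWordGoA, h2, if_true, Bool.false_eq_true, if_false]
    exact goA_false_skip t (i + 1) (by omega)
  · rfl
  · rfl
termination_by ((t.length : Int) - i).toNat
decreasing_by omega

-- at the stop point the recording flag no longer matters
theorem goA_false_eq_true (t : List Char) (i : Int)
    (h : (t.length : Int) ≤ i ∨ ¬ PySem.List.pyGet? t i = some ' ') :
    getWordGoA t (PySem.List.pyRange i (t.length : Int) 1) [] false =
      getWordGoA t (PySem.List.pyRange i (t.length : Int) 1) [] true := by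
  rcases h with h | h
  · rw [PySem.List.pyRange_one_eq_nil (by omega)]; rfl
  · by_cases h1 : i < (t.length : Int)
    · rw [PySem.List.pyRange_one_cons h1]
      cases hg : PySem.List.pyGet? t i with
      | none => simp [getWordGoA, hg]
      | some c =>
        have hc : ¬ c = ' ' := fun hc => h (hc ▸ hg)
        simp [getWordGoA, hg, hc]
    · rw [PySem.List.pyRange_one_eq_nil (by omega)]; rfl


-- ===== VERDICT (by name: the statement is the Claim_ definition above) =====
theorem getWord_spec : Claim_equal_getWord := by
  intro startIndex text _hDom hPre
  unfold Spec_getWord getWord getWord_alt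
  set t := text.toList with ht
  have hlo : -(t.length : Int) ≤ startIndex := hPre
  have hlo' : -(t.length : Int) ≤ getWordSkip t startIndex := by
    have := getWordSkip_ge t startIndex; omega
  rw [goA_false_skip t startIndex hlo,
      goA_false_eq_true t (getWordSkip t startIndex) (getWordSkip_stop t startIndex),
      goA_true_eq t (getWordSkip t startIndex) [] hlo']
  simp
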